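-- pv_equiv track=rewrite | github.com/leginon-org/test2 | appion/appionlib/apProTomo2Aligner.py | nextLargestSize
-- ===== SOURCE A (Python) =====
-- def nextLargestSize(limit):
-- 	'''
-- 	This returns the next largest integer that is divisible by 2, 3, 5, or 7, for FFT purposes.
-- 	Algorithm by Scott Stagg.
-- 	'''
-- 	def lowestRoots(n,factor):
-- 		r=n%factor
-- 		p=n//factor
-- 		while r==0 and p > factor:
-- 			r=p%factor
-- 			p=p//factor
-- 		if p==factor and r==0:
-- 			return p
-- 		else:
-- 			return p*factor+r
--
-- 	limit = int(limit)
-- 	primes=[2,3,5,7]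
-- 	good=[]
-- 	for n in range(0,limit,2):
-- 		lowest=lowestRoots(n,primes[0])
-- 		if lowest==primes[0]:
-- 			good.append(n)
-- 		else:
-- 			for p in primes[1:]:
-- 				lowest=lowestRoots(lowest,p)
-- 				if lowest==p:
-- 					good.append(n)
-- 					break
-- 	return int(good[-1])
-- ===== SOURCE B (Python) =====
-- def nextLargestSize(limit):
-- 	'''
-- 	This returns the next largest integer that is divisible by 2, 3, 5, or 7, for FFT purposes.
-- 	Faster rewrite: instead of scanning every even number below limit, enumerate the
-- 	products 2**a * 3**b * 5**c * 7**d (a >= 1) below limit and keep the largest.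
-- 	'''
-- 	limit = int(limit)
-- 	def powers(p):
-- 		out = []
-- 		v = 1
-- 		while v < limit:
-- 			out.append(v)
-- 			v *= p
-- 		return out
-- 	best = 0
-- 	for a in powers(2)[1:]:
-- 		for b in powers(3):
-- 			for c in powers(5):
-- 				for d in powers(7):
-- 					v = a * b * c * d
-- 					if limit > v > best:
-- 						best = v
-- 	return best
-- ===== Notes on version B (the rewrite author's own statement) =====
-- stated objective: faster
-- what changed: Replaces A's linear scan of every even number below limit (each tested by repeated trial division) with a direct enumeration of all products 2^a*3^b*5^c*7^d (a>=1) below limit, returning the maximum.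
-- outside the precondition, e.g. on nextLargestSize(2): A raises IndexError, B returns 0
import Mathlib
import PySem

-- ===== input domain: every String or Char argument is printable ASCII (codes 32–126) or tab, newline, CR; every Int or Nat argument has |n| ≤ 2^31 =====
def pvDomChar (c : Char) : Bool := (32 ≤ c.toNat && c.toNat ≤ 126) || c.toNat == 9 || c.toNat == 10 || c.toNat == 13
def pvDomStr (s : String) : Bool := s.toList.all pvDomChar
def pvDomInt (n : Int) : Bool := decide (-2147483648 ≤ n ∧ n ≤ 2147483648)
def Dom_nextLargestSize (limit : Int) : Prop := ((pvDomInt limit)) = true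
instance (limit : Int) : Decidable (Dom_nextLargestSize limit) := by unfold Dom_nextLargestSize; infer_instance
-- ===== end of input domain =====

-- B changes the algorithm: it enumerates the products 2^a*3^b*5^c*7^d (a ≥ 1) below limit
-- instead of scanning every even number below limit (objective: faster, asymptotically).

-- ===== PORT A =====
-- the 'while r==0 and p > factor' loop of lowestRoots; '2 ≤ factor' is a totality guard
-- (every call passes factor ∈ {2,3,5,7}) needed only for termination
def lowestRootsLoop (factor r p : Int) : Int × Int :=
  if 2 ≤ factor ∧ r = 0 ∧ factor < p then
    lowestRootsLoop factor (PySem.Int.mod p factor) (PySem.Int.floordiv p factor)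
  else (r, p)
termination_by p.toNat
decreasing_by
  rename_i h
  have hd : PySem.Int.floordiv p factor = p / factor :=
    PySem.Int.floordiv_eq_ediv_of_pos (by omega)
  have hle : p / factor ≤ p := Int.ediv_le_self factor (by omega)
  have h2 : 0 ≤ p / factor := Int.ediv_nonneg (by omega) (by omega)
  have h1 : p / factor < p := by
    rcases eq_or_lt_of_le hle with he | hlt
    · exfalso
      have hdm := Int.mul_ediv_add_emod p factor
      have hm : 0 ≤ p % factor := Int.emod_nonneg p (by omega)
      have hm2 : p % factor < factor := Int.emod_lt_of_pos p (by omega)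
      nlinarith
    · exact hlt
  rw [hd]; omega

def lowestRoots (n factor : Int) : Int :=
  let r := PySem.Int.mod n factor
  let p := PySem.Int.floordiv n factor
  let rp := lowestRootsLoop factor r p
  if rp.2 = factor ∧ rp.1 = 0 then rp.2 else rp.2 * factor + rp.1

-- 'for p in primes[1:]: lowest=lowestRoots(lowest,p); if lowest==p: append; break'
def tryPrimes (ps : List Int) (lowest : Int) : Bool :=
  match ps with
  | [] => false
  | p :: rest =>
    let l := lowestRoots lowest p
    if l = p then true else tryPrimes rest l

def nextLargestSize (limit : Int) : Int :=
  let primes : List Int := [2, 3, 5, 7]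
  let good : List Int :=
    (PySem.List.pyRange 0 limit 2).foldl
      (fun good n =>
        let lowest := lowestRoots n (primes.headD 0)
        if lowest = primes.headD 0 then good ++ [n]
        else if tryPrimes (primes.drop 1) lowest then good ++ [n] else good)
      []
  -- good[-1]: IndexError on empty 'good' (limit ≤ 2); those inputs are excluded by Pre_
  (PySem.List.pyGet? good (-1)).getD 0

-- ===== PORT B =====
-- 'out=[]; v=1; while v < limit: out.append(v); v *= p'; '1 ≤ v ∧ 2 ≤ p' is a totality
-- guard (v starts at 1 and p ∈ {2,3,5,7} at every call), needed only for termination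
def powAux (limit p v : Int) : List Int :=
  if 1 ≤ v ∧ 2 ≤ p ∧ v < limit then v :: powAux limit p (v * p) else []
termination_by (limit - v).toNat
decreasing_by
  rename_i h
  have : v + 1 ≤ v * p := by nlinarith [h.1, h.2.1]
  omega

def nextLargestSize_alt (limit : Int) : Int :=
  let pows2 := (powAux limit 2 1).drop 1   -- powers(2)[1:]
  let pows3 := powAux limit 3 1
  let pows5 := powAux limit 5 1
  let pows7 := powAux limit 7 1
  pows2.foldl (fun best a =>
    pows3.foldl (fun best b =>
      pows5.foldl (fun best c =>
        pows7.foldl (fun best d =>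
          let v := a * b * c * d
          if v < limit ∧ best < v then v else best) best) best) best) 0

-- ===== PRECONDITION & SPEC =====
-- For limit ≤ 2 the scanned list 'good' is empty and A raises IndexError on good[-1];
-- exactly those inputs are excluded.
def Pre_nextLargestSize (limit : Int) : Prop := 3 ≤ limit
instance (limit : Int) : Decidable (Pre_nextLargestSize limit) := by
  unfold Pre_nextLargestSize; infer_instance

def pvWitness_nextLargestSize : Int := (100)

def Spec_nextLargestSize (limit : Int) (out : Int) : Prop := out = nextLargestSize_alt limit
instance (limit : Int) (out : Int) : Decidable (Spec_nextLargestSize limit out) := by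
  unfold Spec_nextLargestSize; infer_instance

-- ===== CLAIM (what is proved, stated in full; the proofs are below) =====
def Claim_equal_nextLargestSize : Prop := ∀ (limit : Int), Dom_nextLargestSize limit → Pre_nextLargestSize limit → Spec_nextLargestSize limit (nextLargestSize limit)

-- ===== LEMMAS AND PROOFS =====

def stripNat (f v : Nat) : Nat :=
  if 2 ≤ f ∧ f ∣ v ∧ 1 ≤ v then stripNat f (v / f) else v
termination_by v
decreasing_by exact Nat.div_lt_self (by omega) (by omega)

def lrNat (f v : Nat) : Nat :=
  if 2 ≤ f ∧ f ∣ v ∧ f < v / f then lrNat f (v / f)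
  else if v = f * f then f else v
termination_by v
decreasing_by
  have := Nat.div_le_self v f
  exact Nat.div_lt_self (by omega) (by omega)

theorem strip_exists_pow (f v : Nat) : ∃ k, v = f ^ k * stripNat f v := by
  induction v using Nat.strong_induction_on with
  | _ v ih =>
    rw [stripNat]
    split
    · rename_i h
      obtain ⟨c, hc⟩ := h.2.1
      subst hc
      rw [Nat.mul_div_cancel_left c (by omega : 0 < f)]
      have hc1 : 1 ≤ c := by
        rcases Nat.eq_zero_or_pos c with rfl | hc1
        · exfalso
          have := h.2.2
          simp at this
        · exact hc1
      obtain ⟨k, hk⟩ := ih c (by nlinarith [h.1])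
      refine ⟨k + 1, ?_⟩
      rw [pow_succ]
      calc f * c = f * (f ^ k * stripNat f c) := by rw [← hk]
        _ = f ^ k * f * stripNat f c := by ring
    · exact ⟨0, by simp⟩

theorem strip_dvd (f v : Nat) : stripNat f v ∣ v := by
  obtain ⟨k, hk⟩ := strip_exists_pow f v
  exact ⟨f ^ k, by rw [Nat.mul_comm]; exact hk⟩

theorem strip_pos (f v : Nat) (hv : 1 ≤ v) : 1 ≤ stripNat f v :=
  Nat.pos_of_dvd_of_pos (strip_dvd f v) hv

theorem strip_not_dvd (f v : Nat) (hf : 2 ≤ f) (hv : 1 ≤ v) : ¬ f ∣ stripNat f v := by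
  induction v using Nat.strong_induction_on with
  | _ v ih =>
    rw [stripNat]
    split
    · rename_i h
      have hq : 1 ≤ v / f := Nat.one_le_div_iff (by omega) |>.mpr (Nat.le_of_dvd hv h.2.1)
      exact ih (v / f) (Nat.div_lt_self (by omega) (by omega)) hq
    · rename_i h
      intro hd
      exact h ⟨hf, hd, hv⟩

theorem strip_pow_mul (f k u : Nat) (hf : 2 ≤ f) (hu : ¬ f ∣ u) :
    stripNat f (f ^ k * u) = u := by
  induction k with
  | zero => rw [stripNat]; simp [hu]
  | succ k ih =>
    have hu0 : u ≠ 0 := by rintro rfl; exact hu ⟨0, by simp⟩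
    rw [stripNat]
    have hcond : 2 ≤ f ∧ f ∣ f ^ (k+1) * u ∧ 1 ≤ f ^ (k+1) * u := by
      refine ⟨hf, Dvd.dvd.mul_right (dvd_pow_self f (by omega)) u, ?_⟩
      exact Nat.mul_pos (Nat.pow_pos (by omega)) (Nat.pos_of_ne_zero hu0)
    rw [if_pos hcond]
    have hdiv : f ^ (k + 1) * u / f = f ^ k * u := by
      rw [pow_succ, mul_comm (f ^ k) f, mul_assoc, Nat.mul_div_cancel_left _ (by omega : 0 < f)]
    rw [hdiv, ih]

theorem strip_one (f : Nat) (hf : 2 ≤ f) : stripNat f 1 = 1 := by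
  rw [stripNat]
  have : ¬ f ∣ 1 := fun hd => by have := Nat.le_of_dvd (by omega) hd; omega
  simp [this]

theorem lrNat_spec (f v : Nat) (hf : 2 ≤ f)
    (hpre : stripNat f v = 1 ∨ f < stripNat f v) :
    lrNat f v = if stripNat f v = 1 ∧ v ≠ 1 then f else stripNat f v := by
  induction v using Nat.strong_induction_on with
  | _ v ih =>
    rw [lrNat]
    split
    · rename_i h
      have hv1 : 1 ≤ v := by
        have := Nat.div_le_self v f; omega
      have hstrip : stripNat f v = stripNat f (v / f) := by
        rw [stripNat, if_pos ⟨h.1, h.2.1, hv1⟩]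
      rw [hstrip] at hpre ⊢
      rw [ih (v / f) (Nat.div_lt_self (by omega) (by omega)) hpre]
      have hvf1 : v / f ≠ 1 := by omega
      have hv1' : v ≠ 1 := by
        intro hveq
        rw [hveq] at h
        have : (1 : Nat) / f = 0 := Nat.div_eq_of_lt (by omega)
        omega
      simp [hvf1, hv1']
    · rename_i h
      split
      · -- v = f * f
        rename_i hsq
        subst hsq
        have hs1 : stripNat f (f * f) = 1 := by
          have h2 := strip_pow_mul f 2 1 hf (fun hd => by have := Nat.le_of_dvd (by omega) hd; omega)
          calc stripNat f (f * f) = stripNat f (f ^ 2 * 1) := by ring_nf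
            _ = 1 := h2
        rw [hs1]
        have : f * f ≠ 1 := by nlinarith
        simp [this]
      · rename_i hsq
        by_cases hdv : f ∣ v
        · rcases Nat.eq_zero_or_pos v with rfl | hv1
          · have h0 : stripNat f 0 = 0 := by rw [stripNat]; simp
            rw [h0] at hpre ⊢
            omega
          · have hq : v / f ≤ f := by
              by_contra hq'
              exact h ⟨hf, hdv, by omega⟩
            have hqpos : 1 ≤ v / f := Nat.one_le_div_iff (by omega) |>.mpr (Nat.le_of_dvd hv1 hdv)
            have hstrip : stripNat f v = stripNat f (v / f) := by
              rw [stripNat, if_pos ⟨hf, hdv, hv1⟩]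
            by_cases hq1 : v / f = 1
            · -- v = f
              have hvf : v = f := by
                obtain ⟨c, hc⟩ := hdv
                subst hc
                rw [Nat.mul_div_cancel_left c (by omega : 0 < f)] at hq1
                simp [hq1]
              rw [hstrip, hq1, strip_one f hf]
              have hvne : v ≠ 1 := by omega
              simp only [hvne, ne_eq, not_false_eq_true, and_true]
              exact hvf
            · exfalso
              have hqlt : v / f < f := by
                rcases Nat.lt_or_ge (v / f) f with h' | h'
                · exact h'
                · exfalso
                  apply hsq
                  have hvq : v / f = f := by omega
                  obtain ⟨c, hc⟩ := hdv
                  subst hc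
                  rw [Nat.mul_div_cancel_left c (by omega : 0 < f)] at hvq
                  rw [hvq]
              have hnd : ¬ f ∣ v / f := fun hd => by
                have := Nat.le_of_dvd (by omega) hd; omega
              have hs : stripNat f (v / f) = v / f := by
                rw [stripNat]; simp [hnd]
              rw [hstrip, hs] at hpre
              omega
        · have hs : stripNat f v = v := by rw [stripNat]; simp [hdv]
          rw [hs] at hpre ⊢
          have hne : ¬ (v = 1 ∧ v ≠ 1) := by tauto
          simp [hne]
def loopN (f v : Nat) : Nat × Nat :=
  if 2 ≤ f ∧ f ∣ v ∧ f < v / f then loopN f (v / f) else (v % f, v / f)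
termination_by v
decreasing_by
  have := Nat.div_le_self v f
  exact Nat.div_lt_self (by omega) (by omega)

theorem loop_eq_loopN (f v : Nat) (hf : 2 ≤ f) :
    lowestRootsLoop (f : Int) ((v % f : Nat) : Int) ((v / f : Nat) : Int) =
      (((loopN f v).1 : Int), ((loopN f v).2 : Int)) := by
  induction v using Nat.strong_induction_on with
  | _ v ih =>
    rw [lowestRootsLoop, loopN]
    have hcast : (2 ≤ (f : Int) ∧ ((v % f : Nat) : Int) = 0 ∧ (f : Int) < ((v / f : Nat) : Int))
        ↔ (2 ≤ f ∧ f ∣ v ∧ f < v / f) := by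
      constructor
      · rintro ⟨h1, h2, h3⟩
        exact ⟨by exact_mod_cast h1, Nat.dvd_of_mod_eq_zero (by exact_mod_cast h2), by exact_mod_cast h3⟩
      · rintro ⟨h1, h2, h3⟩
        exact ⟨by exact_mod_cast h1, by simp [Nat.mod_eq_zero_of_dvd h2], by exact_mod_cast h3⟩
    by_cases hc : 2 ≤ f ∧ f ∣ v ∧ f < v / f
    · rw [if_pos (hcast.mpr hc), if_pos hc]
      rw [PySem.Int.mod_natCast, PySem.Int.floordiv_natCast]
      have hlt : v / f < v := by
        have := Nat.div_le_self v f
        exact Nat.div_lt_self (by omega) (by omega)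
      exact ih (v / f) hlt
    · rw [if_neg (fun h => hc (hcast.mp h)), if_neg hc]

theorem lrNat_final (f v : Nat) (hf : 2 ≤ f) :
    lrNat f v =
      (if (loopN f v).2 = f ∧ (loopN f v).1 = 0 then (loopN f v).2
       else (loopN f v).2 * f + (loopN f v).1) := by
  induction v using Nat.strong_induction_on with
  | _ v ih =>
    by_cases hc : 2 ≤ f ∧ f ∣ v ∧ f < v / f
    · have hL : loopN f v = loopN f (v / f) := by rw [loopN, if_pos hc]
      rw [lrNat, if_pos hc, hL]
      have hlt : v / f < v := by
        have := Nat.div_le_self v f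
        exact Nat.div_lt_self (by omega) (by omega)
      exact ih (v / f) hlt
    · have hL : loopN f v = (v % f, v / f) := by rw [loopN, if_neg hc]
      rw [lrNat, if_neg hc, hL]
      by_cases hsq : v = f * f
      · subst hsq
        have hd : f * f / f = f := by
          rw [Nat.mul_div_cancel_left f (by omega : 0 < f)]
        have hm : f * f % f = 0 := by
          rw [Nat.mul_mod_left]
        simp [hd, hm]
      · rw [if_neg hsq]
        have hdm : f * (v / f) + v % f = v := Nat.div_add_mod v f
        have hcond : ¬ ((v % f, v / f).2 = f ∧ (v % f, v / f).1 = 0) := by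
          rintro ⟨h1, h2⟩
          apply hsq
          simp only at h1 h2
          rw [h1, h2] at hdm
          omega
        rw [if_neg hcond]
        simp only
        rw [Nat.mul_comm]
        omega

theorem lowestRoots_eq (f v : Nat) (hf : 2 ≤ f) :
    lowestRoots (v : Int) (f : Int) = ((lrNat f v : Nat) : Int) := by
  show (let r := PySem.Int.mod (v : Int) (f : Int)
        let p := PySem.Int.floordiv (v : Int) (f : Int)
        let rp := lowestRootsLoop (f : Int) r p
        if rp.2 = (f : Int) ∧ rp.1 = 0 then rp.2 else rp.2 * (f : Int) + rp.1) = _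
  simp only [PySem.Int.mod_natCast, PySem.Int.floordiv_natCast]
  rw [loop_eq_loopN f v hf, lrNat_final f v hf]
  dsimp only
  by_cases hc : (loopN f v).2 = f ∧ (loopN f v).1 = 0
  · rw [if_pos hc, if_pos ⟨by exact_mod_cast hc.1, by exact_mod_cast hc.2⟩]
  · rw [if_neg hc, if_neg (by
      rintro ⟨h1, h2⟩
      exact hc ⟨by exact_mod_cast h1, by exact_mod_cast h2⟩)]
    push_cast
    ring

def goodTest (n : Int) : Bool :=
  let l := lowestRoots n 2
  if l = 2 then true else tryPrimes [3, 5, 7] l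

theorem lrNat_zero (f : Nat) (hf : 2 ≤ f) : lrNat f 0 = 0 := by
  rw [lrNat]
  have h1 : ¬ (2 ≤ f ∧ f ∣ 0 ∧ f < 0 / f) := by
    rintro ⟨_, _, h⟩
    simp at h
  rw [if_neg h1, if_neg (by nlinarith : ¬ (0 = f * f))]

theorem or_gt2 (u : Nat) (h1 : 1 ≤ u) (h2 : ¬ 2 ∣ u) : u = 1 ∨ 2 < u := by
  rcases Nat.lt_or_ge u 3 with h | h
  · interval_cases u <;> omega
  · right; omega

theorem or_gt3 (u : Nat) (h1 : 1 ≤ u) (h2 : ¬ 2 ∣ u) (h3 : ¬ 3 ∣ u) : u = 1 ∨ 3 < u := by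
  rcases Nat.lt_or_ge u 4 with h | h
  · interval_cases u <;> omega
  · right; omega

theorem or_gt5 (u : Nat) (h1 : 1 ≤ u) (h2 : ¬ 2 ∣ u) (h3 : ¬ 3 ∣ u) (h5 : ¬ 5 ∣ u) :
    u = 1 ∨ 5 < u := by
  rcases Nat.lt_or_ge u 6 with h | h
  · interval_cases u <;> omega
  · right; omega

theorem or_gt7 (u : Nat) (h1 : 1 ≤ u) (h2 : ¬ 2 ∣ u) (h3 : ¬ 3 ∣ u) (h5 : ¬ 5 ∣ u)
    (h7 : ¬ 7 ∣ u) : u = 1 ∨ 7 < u := by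
  rcases Nat.lt_or_ge u 8 with h | h
  · interval_cases u <;> omega
  · right; omega

-- the test A applies to each even n, characterized by full stripping
theorem goodTest_iff (v : Nat) (hev : 2 ∣ v) :
    goodTest (v : Int) = true ↔
      (1 ≤ v ∧ stripNat 7 (stripNat 5 (stripNat 3 (stripNat 2 v))) = 1) := by
  rcases Nat.eq_zero_or_pos v with rfl | hv1
  · -- v = 0
    have e2 : lowestRoots ((0:Nat) : Int) ((2:Nat) : Int) = ((lrNat 2 0 : Nat) : Int) :=
      lowestRoots_eq 2 0 (by omega)
    have e3 : lowestRoots ((0:Nat) : Int) ((3:Nat) : Int) = ((lrNat 3 0 : Nat) : Int) :=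
      lowestRoots_eq 3 0 (by omega)
    have e5 : lowestRoots ((0:Nat) : Int) ((5:Nat) : Int) = ((lrNat 5 0 : Nat) : Int) :=
      lowestRoots_eq 5 0 (by omega)
    have e7 : lowestRoots ((0:Nat) : Int) ((7:Nat) : Int) = ((lrNat 7 0 : Nat) : Int) :=
      lowestRoots_eq 7 0 (by omega)
    rw [lrNat_zero 2 (by omega)] at e2
    rw [lrNat_zero 3 (by omega)] at e3
    rw [lrNat_zero 5 (by omega)] at e5
    rw [lrNat_zero 7 (by omega)] at e7
    push_cast at e2 e3 e5 e7
    simp [goodTest, tryPrimes, e2, e3, e5, e7]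
  · set u1 := stripNat 2 v with hu1
    set u2 := stripNat 3 u1 with hu2
    set u3 := stripNat 5 u2 with hu3
    set u4 := stripNat 7 u3 with hu4
    have hvne1 : v ≠ 1 := by
      intro h; rw [h] at hev; omega
    have hu1pos : 1 ≤ u1 := strip_pos 2 v hv1
    have hu2pos : 1 ≤ u2 := strip_pos 3 u1 hu1pos
    have hu3pos : 1 ≤ u3 := strip_pos 5 u2 hu2pos
    have hu4pos : 1 ≤ u4 := strip_pos 7 u3 hu3pos
    have hn2u1 : ¬ 2 ∣ u1 := strip_not_dvd 2 v (by omega) hv1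
    have hn3u2 : ¬ 3 ∣ u2 := strip_not_dvd 3 u1 (by omega) hu1pos
    have hn5u3 : ¬ 5 ∣ u3 := strip_not_dvd 5 u2 (by omega) hu2pos
    have hn7u4 : ¬ 7 ∣ u4 := strip_not_dvd 7 u3 (by omega) hu3pos
    have hd21 : u2 ∣ u1 := strip_dvd 3 u1
    have hd32 : u3 ∣ u2 := strip_dvd 5 u2
    have hd43 : u4 ∣ u3 := strip_dvd 7 u3
    have hn2u2 : ¬ 2 ∣ u2 := fun h => hn2u1 (h.trans hd21)
    have hn2u3 : ¬ 2 ∣ u3 := fun h => hn2u2 (h.trans hd32)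
    have hn3u3 : ¬ 3 ∣ u3 := fun h => hn3u2 (h.trans hd32)
    have hn2u4 : ¬ 2 ∣ u4 := fun h => hn2u3 (h.trans hd43)
    have hn3u4 : ¬ 3 ∣ u4 := fun h => hn3u3 (h.trans hd43)
    have hn5u4 : ¬ 5 ∣ u4 := fun h => hn5u3 (h.trans hd43)
    have e2 : lowestRoots (v : Int) 2 = ((lrNat 2 v : Nat) : Int) := by
      exact_mod_cast lowestRoots_eq 2 v (by omega)
    have l2 : lrNat 2 v = if u1 = 1 then 2 else u1 := by
      rw [lrNat_spec 2 v (by omega) (by rw [← hu1]; exact or_gt2 u1 hu1pos hn2u1), ← hu1]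
      simp [hvne1]
    by_cases hc1 : u1 = 1
    · -- v is a power of 2
      have hu41 : u4 = 1 := by
        rw [hu4, hu3, hu2, hc1, strip_one 3 (by omega), strip_one 5 (by omega),
          strip_one 7 (by omega)]
      simp [goodTest, e2, l2, hc1]
      exact ⟨hv1, hu41⟩
    · have hu1gt : 2 < u1 := (or_gt2 u1 hu1pos hn2u1).resolve_left hc1
      have e3 : lowestRoots ((u1 : Nat) : Int) 3 = ((lrNat 3 u1 : Nat) : Int) := by
        exact_mod_cast lowestRoots_eq 3 u1 (by omega)
      have l3 : lrNat 3 u1 = if u2 = 1 then 3 else u2 := by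
        rw [lrNat_spec 3 u1 (by omega) (by rw [← hu2]; exact or_gt3 u2 hu2pos hn2u2 hn3u2), ← hu2]
        simp [hc1]
      by_cases hc2 : u2 = 1
      · have hu41 : u4 = 1 := by
          rw [hu4, hu3, hc2, strip_one 5 (by omega), strip_one 7 (by omega)]
        have hne2 : ((u1 : Nat) : Int) ≠ 2 := by
          intro h
          have h' : u1 = 2 := by exact_mod_cast h
          omega
        simp [goodTest, e2, l2, hc1, tryPrimes, e3, l3, hc2, hne2]
        exact ⟨hv1, hu41⟩
      · have hu2gt : 3 < u2 := (or_gt3 u2 hu2pos hn2u2 hn3u2).resolve_left hc2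
        have e5 : lowestRoots ((u2 : Nat) : Int) 5 = ((lrNat 5 u2 : Nat) : Int) := by
          exact_mod_cast lowestRoots_eq 5 u2 (by omega)
        have l5 : lrNat 5 u2 = if u3 = 1 then 5 else u3 := by
          rw [lrNat_spec 5 u2 (by omega) (by rw [← hu3]; exact or_gt5 u3 hu3pos hn2u3 hn3u3 hn5u3), ← hu3]
          simp [hc2]
        by_cases hc3 : u3 = 1
        · have hu41 : u4 = 1 := by rw [hu4, hc3, strip_one 7 (by omega)]
          have hne2 : ((u1 : Nat) : Int) ≠ 2 := by
            intro h
            have h' : u1 = 2 := by exact_mod_cast h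
            omega
          have hne3 : ((u2 : Nat) : Int) ≠ 3 := by
            intro h
            have h' : u2 = 3 := by exact_mod_cast h
            omega
          simp [goodTest, e2, l2, hc1, tryPrimes, e3, l3, hc2, e5, l5, hc3, hne2, hne3]
          exact ⟨hv1, hu41⟩
        · have hu3gt : 5 < u3 := (or_gt5 u3 hu3pos hn2u3 hn3u3 hn5u3).resolve_left hc3
          have e7 : lowestRoots ((u3 : Nat) : Int) 7 = ((lrNat 7 u3 : Nat) : Int) := by
            exact_mod_cast lowestRoots_eq 7 u3 (by omega)
          have l7 : lrNat 7 u3 = if u4 = 1 then 7 else u4 := by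
            rw [lrNat_spec 7 u3 (by omega) (by rw [← hu4]; exact or_gt7 u4 hu4pos hn2u4 hn3u4 hn5u4 hn7u4), ← hu4]
            simp [hc3]
          have hne2 : ((u1 : Nat) : Int) ≠ 2 := by
            intro h
            have h' : u1 = 2 := by exact_mod_cast h
            omega
          have hne3 : ((u2 : Nat) : Int) ≠ 3 := by
            intro h
            have h' : u2 = 3 := by exact_mod_cast h
            omega
          by_cases hc4 : u4 = 1
          · simp [goodTest, e2, l2, hc1, tryPrimes, e3, l3, hc2, e5, l5, hc3, e7, l7, hc4,
              hne2, hne3]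
            exact hv1
          · have hu4gt : 7 < u4 := (or_gt7 u4 hu4pos hn2u4 hn3u4 hn5u4 hn7u4).resolve_left hc4
            have hne5 : ((u3 : Nat) : Int) ≠ 5 := by
              intro h
              have h' : u3 = 5 := by exact_mod_cast h
              omega
            have hne7 : ((u4 : Nat) : Int) ≠ 7 := by
              intro h
              have h' : u4 = 7 := by exact_mod_cast h
              omega
            simp [goodTest, e2, l2, hc1, tryPrimes, e3, l3, hc2, e5, l5, hc3, e7, l7,
              hne2, hne3, hne5, hne7]
            omega

theorem not_dvd_of_primes {p : Nat} (hp : Nat.Prime p) (b c d : Nat)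
    (h3 : ¬ p ∣ 3) (h5 : ¬ p ∣ 5) (h7 : ¬ p ∣ 7) : ¬ p ∣ 3 ^ b * 5 ^ c * 7 ^ d := by
  intro h
  rcases (Nat.Prime.dvd_mul hp).mp h with h' | h'
  · rcases (Nat.Prime.dvd_mul hp).mp h' with h'' | h''
    · exact h3 (Nat.Prime.dvd_of_dvd_pow hp h'')
    · exact h5 (Nat.Prime.dvd_of_dvd_pow hp h'')
  · exact h7 (Nat.Prime.dvd_of_dvd_pow hp h')

theorem smooth_iff_rep (v : Nat) (hv : 1 ≤ v) :
    stripNat 7 (stripNat 5 (stripNat 3 (stripNat 2 v))) = 1 ↔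
      ∃ a b c d : Nat, v = 2 ^ a * 3 ^ b * 5 ^ c * 7 ^ d := by
  constructor
  · intro h
    obtain ⟨a, ha⟩ := strip_exists_pow 2 v
    obtain ⟨b, hb⟩ := strip_exists_pow 3 (stripNat 2 v)
    obtain ⟨c, hc⟩ := strip_exists_pow 5 (stripNat 3 (stripNat 2 v))
    obtain ⟨d, hd⟩ := strip_exists_pow 7 (stripNat 5 (stripNat 3 (stripNat 2 v)))
    rw [h, mul_one] at hd
    rw [hd] at hc
    rw [hc] at hb
    rw [hb] at ha
    exact ⟨a, b, c, d, by rw [ha]; ring⟩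
  · rintro ⟨a, b, c, d, rfl⟩
    have h2 : ¬ (2:Nat) ∣ 3 ^ b * 5 ^ c * 7 ^ d :=
      not_dvd_of_primes (by norm_num) b c d (by norm_num) (by norm_num) (by norm_num)
    have h3 : ¬ (3:Nat) ∣ 5 ^ c * 7 ^ d := by
      intro h
      rcases (Nat.Prime.dvd_mul (by norm_num)).mp h with h' | h'
      · exact absurd (Nat.Prime.dvd_of_dvd_pow (by norm_num) h') (by norm_num)
      · exact absurd (Nat.Prime.dvd_of_dvd_pow (by norm_num) h') (by norm_num)
    have h5 : ¬ (5:Nat) ∣ 7 ^ d := by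
      intro h
      exact absurd (Nat.Prime.dvd_of_dvd_pow (by norm_num) h) (by norm_num)
    have h7 : ¬ (7:Nat) ∣ 1 := by norm_num
    have s2 : stripNat 2 (2 ^ a * 3 ^ b * 5 ^ c * 7 ^ d) = 3 ^ b * 5 ^ c * 7 ^ d := by
      have harg : 2 ^ a * 3 ^ b * 5 ^ c * 7 ^ d = 2 ^ a * (3 ^ b * 5 ^ c * 7 ^ d) := by ring
      rw [harg]
      exact strip_pow_mul 2 a (3 ^ b * 5 ^ c * 7 ^ d) (by omega) h2
    have s3 : stripNat 3 (3 ^ b * 5 ^ c * 7 ^ d) = 5 ^ c * 7 ^ d := by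
      have harg : 3 ^ b * 5 ^ c * 7 ^ d = 3 ^ b * (5 ^ c * 7 ^ d) := by ring
      rw [harg]
      exact strip_pow_mul 3 b (5 ^ c * 7 ^ d) (by omega) h3
    have s5 : stripNat 5 (5 ^ c * 7 ^ d) = 7 ^ d := strip_pow_mul 5 c (7 ^ d) (by omega) h5
    have s7 : stripNat 7 (7 ^ d) = 1 := by
      have h := strip_pow_mul 7 d 1 (by omega) h7
      rw [mul_one] at h
      exact h
    rw [s2, s3, s5, s7]

-- ========= A-side assembly =========

def SP (limit x : Int) : Prop :=
  x < limit ∧ ∃ a b c d : Nat, x = 2 ^ (a + 1) * 3 ^ b * 5 ^ c * 7 ^ d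

theorem nextLargestSize_eq_getLast (limit : Int) :
    nextLargestSize limit =
      (((PySem.List.pyRange 0 limit 2).filter goodTest).getLast?).getD 0 := by
  show (PySem.List.pyGet?
      ((PySem.List.pyRange 0 limit 2).foldl
        (fun good n =>
          let lowest := lowestRoots n (([2,3,5,7] : List Int).headD 0)
          if lowest = ([2,3,5,7] : List Int).headD 0 then good ++ [n]
          else if tryPrimes (([2,3,5,7] : List Int).drop 1) lowest then good ++ [n] else good)
        []) (-1)).getD 0 = _
  have hbody : (fun (good : List Int) (n : Int) =>
        let lowest := lowestRoots n (([2,3,5,7] : List Int).headD 0)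
        if lowest = ([2,3,5,7] : List Int).headD 0 then good ++ [n]
        else if tryPrimes (([2,3,5,7] : List Int).drop 1) lowest then good ++ [n] else good)
      = fun good n => if goodTest n then good ++ [n] else good := by
    funext g n
    by_cases h1 : lowestRoots n 2 = 2
    · simp [goodTest, h1]
    · by_cases h2 : tryPrimes [3, 5, 7] (lowestRoots n 2) <;> simp [goodTest, h1, h2]
  rw [hbody, PySem.List.foldl_append_if_eq_filter, List.nil_append, PySem.List.pyGet?_neg_one]

theorem mem_evenRange (limit x : Int) :
    x ∈ PySem.List.pyRange 0 limit 2 ↔ 0 ≤ x ∧ x < limit ∧ 2 ∣ x := by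
  rw [PySem.List.mem_pyRange_iff_of_pos (by omega)]
  constructor
  · rintro ⟨h1, h2, h3⟩
    exact ⟨h1, h2, by simpa using h3⟩
  · rintro ⟨h1, h2, h3⟩
    exact ⟨h1, h2, by simpa using h3⟩

theorem mem_good_iff (limit x : Int) :
    (x ∈ PySem.List.pyRange 0 limit 2 ∧ goodTest x = true) ↔ SP limit x := by
  constructor
  · rintro ⟨hm, hg⟩
    rw [mem_evenRange] at hm
    obtain ⟨h0, hlt, hev⟩ := hm
    set v := x.toNat with hv
    have hx : x = (v : Int) := by omega
    have hevv : 2 ∣ v := by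
      obtain ⟨c, hc⟩ := hev
      exact ⟨c.toNat, by omega⟩
    rw [hx] at hg
    obtain ⟨hv1, hchain⟩ := (goodTest_iff v hevv).mp hg
    obtain ⟨a, b, c, d, hrep⟩ := (smooth_iff_rep v hv1).mp hchain
    have ha : 1 ≤ a := by
      by_contra ha0
      have ha0' : a = 0 := by omega
      rw [ha0', pow_zero, one_mul] at hrep
      have h2d : (2:Nat) ∣ 3 ^ b * 5 ^ c * 7 ^ d := hrep ▸ hevv
      exact not_dvd_of_primes (by norm_num) b c d (by norm_num) (by norm_num) (by norm_num) h2d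
    refine ⟨hlt, a - 1, b, c, d, ?_⟩
    have ha' : a - 1 + 1 = a := by omega
    rw [ha', hx, hrep]
    push_cast
    ring
  · rintro ⟨hlt, a, b, c, d, hrep⟩
    have hxnat : x = ((2 ^ (a+1) * 3 ^ b * 5 ^ c * 7 ^ d : Nat) : Int) := by
      rw [hrep]; push_cast; ring
    have hvpos : 1 ≤ 2 ^ (a+1) * 3 ^ b * 5 ^ c * 7 ^ d := by
      have h : 0 < 2 ^ (a+1) * 3 ^ b * 5 ^ c * 7 ^ d :=
        Nat.mul_pos (Nat.mul_pos (Nat.mul_pos (Nat.pow_pos (by omega)) (Nat.pow_pos (by omega)))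
          (Nat.pow_pos (by omega))) (Nat.pow_pos (by omega))
      omega
    have hevv : (2:Nat) ∣ 2 ^ (a+1) * 3 ^ b * 5 ^ c * 7 ^ d := by
      have : (2:Nat) ∣ 2 ^ (a+1) := dvd_pow_self 2 (by omega)
      exact Dvd.dvd.mul_right (Dvd.dvd.mul_right (Dvd.dvd.mul_right this _) _) _
    constructor
    · rw [mem_evenRange]
      refine ⟨by rw [hxnat]; exact_mod_cast Nat.zero_le _, hlt, ?_⟩
      rw [hxnat]
      exact_mod_cast Int.natCast_dvd_natCast.mpr hevv
    · rw [hxnat]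
      apply (goodTest_iff _ hevv).mpr
      exact ⟨hvpos, (smooth_iff_rep _ hvpos).mpr ⟨a+1, b, c, d, rfl⟩⟩

theorem pairwise_lt_evenRange (limit : Int) :
    (PySem.List.pyRange 0 limit 2).Pairwise (· < ·) := by
  rw [PySem.List.pyRange_of_pos 0 limit (by omega)]
  apply List.Pairwise.map
  · intro a b (hab : a < b)
    show (0:Int) + 2 * a < 0 + 2 * b
    omega
  · exact List.pairwise_lt_range

theorem le_getLast_of_pairwise {l : List Int} (hp : l.Pairwise (· < ·)) (hne : l ≠ []) :
    ∀ x ∈ l, x ≤ l.getLast hne := by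
  induction l with
  | nil => simp at hne
  | cons a t ih =>
    intro x hx
    rcases List.eq_nil_or_concat t with rfl | ⟨_, _, _⟩
    · simp at hx
      simp [hx]
    · have htne : t ≠ [] := by
        rename_i h
        obtain ⟨l', b, rfl⟩ := h
        simp
      rw [List.getLast_cons htne]
      rcases List.mem_cons.mp hx with rfl | hxt
      · have := List.rel_of_pairwise_cons hp (List.getLast_mem htne)
        omega
      · exact ih (List.Pairwise.of_cons hp) htne x hxt

theorem A_max (limit : Int) (h3 : 3 ≤ limit) :
    SP limit (nextLargestSize limit) ∧
      ∀ x : Int, SP limit x → x ≤ nextLargestSize limit := by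
  set G := (PySem.List.pyRange 0 limit 2).filter goodTest with hG
  have hGmem : ∀ x : Int, x ∈ G ↔ SP limit x := by
    intro x
    rw [hG, List.mem_filter, mem_good_iff]
  have h2SP : SP limit 2 := by
    refine ⟨by omega, 0, 0, 0, 0, by norm_num⟩
  have h2G : (2:Int) ∈ G := (hGmem 2).mpr h2SP
  have hne : G ≠ [] := fun h => by rw [h] at h2G; simp at h2G
  have hpw : G.Pairwise (· < ·) :=
    List.Pairwise.sublist List.filter_sublist (pairwise_lt_evenRange limit)
  have hlast : nextLargestSize limit = G.getLast hne := by
    rw [nextLargestSize_eq_getLast, ← hG, List.getLast?_eq_some_getLast hne]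
    rfl
  constructor
  · rw [hlast]
    exact (hGmem _).mp (List.getLast_mem hne)
  · intro x hx
    rw [hlast]
    exact le_getLast_of_pairwise hpw hne x ((hGmem x).mpr hx)

-- ========= B-side assembly =========

theorem mem_powAux_aux (limit p : Int) (hp : 2 ≤ p) (x : Int) :
    ∀ (n : Nat) (v : Int), (limit - v).toNat ≤ n → 1 ≤ v →
      (x ∈ powAux limit p v ↔ ∃ k : Nat, x = v * p ^ k ∧ x < limit) := by
  intro n
  induction n with
  | zero =>
    intro v hn hv
    rw [powAux, if_neg (by omega)]
    simp only [List.not_mem_nil, false_iff]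
    rintro ⟨k, rfl, hlt⟩
    have hpk : (1:Int) ≤ p ^ k := one_le_pow₀ (by omega)
    have hvk : v * 1 ≤ v * p ^ k := mul_le_mul_of_nonneg_left hpk (by omega)
    omega
  | succ n ih =>
    intro v hn hv
    rw [powAux]
    by_cases hc : 1 ≤ v ∧ 2 ≤ p ∧ v < limit
    · rw [if_pos hc]
      have hvp : v + 1 ≤ v * p := by nlinarith
      rw [List.mem_cons, ih (v * p) (by omega) (by omega)]
      constructor
      · rintro (rfl | ⟨k, rfl, hlt⟩)
        · exact ⟨0, by ring, hc.2.2⟩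
        · exact ⟨k + 1, by ring, hlt⟩
      · rintro ⟨k, rfl, hlt⟩
        cases k with
        | zero => left; ring
        | succ k => right; exact ⟨k, by ring, hlt⟩
    · rw [if_neg hc]
      simp only [List.not_mem_nil, false_iff]
      rintro ⟨k, rfl, hlt⟩
      have hpk : (1:Int) ≤ p ^ k := one_le_pow₀ (by omega)
      have hvk : v * 1 ≤ v * p ^ k := mul_le_mul_of_nonneg_left hpk (by omega)
      omega

theorem mem_powAux (limit p : Int) (hp : 2 ≤ p) (v : Int) (hv : 1 ≤ v) (x : Int) :
    x ∈ powAux limit p v ↔ ∃ k : Nat, x = v * p ^ k ∧ x < limit :=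
  mem_powAux_aux limit p hp x (limit - v).toNat v (le_refl _) hv

theorem drop_powAux2 (limit : Int) (h3 : 3 ≤ limit) :
    (powAux limit 2 1).drop 1 = powAux limit 2 2 := by
  rw [powAux, if_pos (by omega)]
  norm_num

def prodList (limit : Int) : List Int :=
  ((powAux limit 2 1).drop 1).flatMap (fun a =>
    (powAux limit 3 1).flatMap (fun b =>
      (powAux limit 5 1).flatMap (fun c =>
        (powAux limit 7 1).map (fun d => a * b * c * d))))

theorem foldl_foldl {α β γ : Type} (f : γ → β → γ) (g : α → List β) :
    ∀ (l : List α) (init : γ),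
      l.foldl (fun acc a => (g a).foldl f acc) init = (l.flatMap g).foldl f init := by
  intro l
  induction l with
  | nil => intro init; rfl
  | cons a t ih =>
    intro init
    rw [List.flatMap_cons, List.foldl_append, List.foldl_cons, ih]

theorem alt_eq_flat (limit : Int) :
    nextLargestSize_alt limit =
      (prodList limit).foldl (fun best v => if v < limit ∧ best < v then v else best) 0 := by
  show ((powAux limit 2 1).drop 1).foldl _ 0 = _
  rw [prodList]
  rw [← foldl_foldl (fun best v => if v < limit ∧ best < v then v else best)]
  congr 1
  funext acc a
  rw [← foldl_foldl (fun best v => if v < limit ∧ best < v then v else best)]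
  congr 1
  funext acc' b
  rw [← foldl_foldl (fun best v => if v < limit ∧ best < v then v else best)]
  congr 1
  funext acc'' c
  rw [List.foldl_map]

theorem foldl_step_ge_init (limit : Int) :
    ∀ (l : List Int) (b : Int),
      b ≤ l.foldl (fun best v => if v < limit ∧ best < v then v else best) b := by
  intro l
  induction l with
  | nil => intro b; simp
  | cons x t ih =>
    intro b
    rw [List.foldl_cons]
    calc b ≤ (if x < limit ∧ b < x then x else b) := by split <;> omega
      _ ≤ _ := ih _

theorem foldl_step_cases (limit : Int) :
    ∀ (l : List Int) (b : Int),
      l.foldl (fun best v => if v < limit ∧ best < v then v else best) b = b ∨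
        (l.foldl (fun best v => if v < limit ∧ best < v then v else best) b ∈ l ∧
          l.foldl (fun best v => if v < limit ∧ best < v then v else best) b < limit) := by
  intro l
  induction l with
  | nil => intro b; left; rfl
  | cons x t ih =>
    intro b
    rw [List.foldl_cons]
    by_cases hc : x < limit ∧ b < x
    · rw [if_pos hc]
      rcases ih x with h | ⟨h1, h2⟩
      · right
        rw [h]
        exact ⟨List.mem_cons_self, hc.1⟩
      · right
        exact ⟨List.mem_cons_of_mem _ h1, h2⟩
    · rw [if_neg hc]
      rcases ih b with h | ⟨h1, h2⟩
      · left; exact h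
      · right; exact ⟨List.mem_cons_of_mem _ h1, h2⟩

theorem le_foldl_step (limit : Int) :
    ∀ (l : List Int) (b x : Int), x ∈ l → x < limit →
      x ≤ l.foldl (fun best v => if v < limit ∧ best < v then v else best) b := by
  intro l
  induction l with
  | nil => intro b x hx; simp at hx
  | cons y t ih =>
    intro b x hx hlt
    rw [List.foldl_cons]
    rcases List.mem_cons.mp hx with rfl | hxt
    · calc x ≤ (if x < limit ∧ b < x then x else b) := by split <;> omega
        _ ≤ _ := foldl_step_ge_init limit t _
    · exact ih _ x hxt hlt

theorem mem_prodList (limit : Int) (h3 : 3 ≤ limit) (x : Int) :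
    x ∈ prodList limit ↔
      ∃ a b c d : Nat, x = 2 ^ (a+1) * 3 ^ b * 5 ^ c * 7 ^ d ∧
        2 ^ (a+1) < limit ∧ 3 ^ b < limit ∧ 5 ^ c < limit ∧ 7 ^ d < limit := by
  rw [prodList, drop_powAux2 limit h3]
  simp only [List.mem_flatMap, List.mem_map]
  constructor
  · rintro ⟨a0, ha0, b0, hb0, c0, hc0, d0, hd0, rfl⟩
    obtain ⟨ka, rfl, hla⟩ := (mem_powAux limit 2 (by omega) 2 (by omega) a0).mp ha0
    obtain ⟨kb, rfl, hlb⟩ := (mem_powAux limit 3 (by omega) 1 (by omega) b0).mp hb0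
    obtain ⟨kc, rfl, hlc⟩ := (mem_powAux limit 5 (by omega) 1 (by omega) c0).mp hc0
    obtain ⟨kd, rfl, hld⟩ := (mem_powAux limit 7 (by omega) 1 (by omega) d0).mp hd0
    refine ⟨ka, kb, kc, kd, by ring, ?_, ?_, ?_, ?_⟩
    · rw [pow_succ]; nlinarith
    · nlinarith
    · nlinarith
    · nlinarith
  · rintro ⟨a, b, c, d, rfl, h2a, h3b, h5c, h7d⟩
    refine ⟨2 ^ (a+1), ?_, 3 ^ b, ?_, 5 ^ c, ?_, 7 ^ d, ?_, by ring⟩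
    · exact (mem_powAux limit 2 (by omega) 2 (by omega) _).mpr ⟨a, by rw [pow_succ]; ring, h2a⟩
    · exact (mem_powAux limit 3 (by omega) 1 (by omega) _).mpr ⟨b, by ring, h3b⟩
    · exact (mem_powAux limit 5 (by omega) 1 (by omega) _).mpr ⟨c, by ring, h5c⟩
    · exact (mem_powAux limit 7 (by omega) 1 (by omega) _).mpr ⟨d, by ring, h7d⟩

theorem B_max (limit : Int) (h3 : 3 ≤ limit) :
    SP limit (nextLargestSize_alt limit) ∧
      ∀ x : Int, SP limit x → x ≤ nextLargestSize_alt limit := by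
  have hmax : ∀ x : Int, SP limit x → x ≤ nextLargestSize_alt limit := by
    rintro x ⟨hlt, a, b, c, d, rfl⟩
    have h1a : (1:Int) ≤ 2 ^ (a+1) := one_le_pow₀ (by omega)
    have h1b : (1:Int) ≤ 3 ^ b := one_le_pow₀ (by omega)
    have h1c : (1:Int) ≤ 5 ^ c := one_le_pow₀ (by omega)
    have h1d : (1:Int) ≤ 7 ^ d := one_le_pow₀ (by omega)
    have hba : 2 ^ (a+1) * 3 ^ b * 5 ^ c * 7 ^ d < limit := hlt
    have h1ab : (1:Int) ≤ 2 ^ (a+1) * 3 ^ b := by nlinarith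
    have h1abc : (1:Int) ≤ 2 ^ (a+1) * 3 ^ b * 5 ^ c := by nlinarith
    have t2 : (2:Int) ^ (a+1) * 3 ^ b ≤ (2:Int) ^ (a+1) * 3 ^ b * 5 ^ c :=
      le_mul_of_one_le_right (by positivity) h1c
    have t3 : (2:Int) ^ (a+1) * 3 ^ b * 5 ^ c ≤ (2:Int) ^ (a+1) * 3 ^ b * 5 ^ c * 7 ^ d :=
      le_mul_of_one_le_right (by positivity) h1d
    have hxa : (2:Int) ^ (a+1) ≤ (2:Int) ^ (a+1) * 3 ^ b * 5 ^ c * 7 ^ d :=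
      (le_mul_of_one_le_right (by positivity) h1b).trans (t2.trans t3)
    have hxb : (3:Int) ^ b ≤ (2:Int) ^ (a+1) * 3 ^ b * 5 ^ c * 7 ^ d :=
      (le_mul_of_one_le_left (by positivity) h1a).trans (t2.trans t3)
    have hxc : (5:Int) ^ c ≤ (2:Int) ^ (a+1) * 3 ^ b * 5 ^ c * 7 ^ d :=
      (le_mul_of_one_le_left (by positivity) h1ab).trans t3
    have hxd : (7:Int) ^ d ≤ (2:Int) ^ (a+1) * 3 ^ b * 5 ^ c * 7 ^ d :=
      le_mul_of_one_le_left (by positivity) h1abc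
    have hmem : 2 ^ (a+1) * 3 ^ b * 5 ^ c * 7 ^ d ∈ prodList limit :=
      (mem_prodList limit h3 _).mpr
        ⟨a, b, c, d, rfl, by omega, by omega, by omega, by omega⟩
    rw [alt_eq_flat]
    exact le_foldl_step limit (prodList limit) 0 _ hmem hlt
  have hSP2 : SP limit 2 := ⟨by omega, 0, 0, 0, 0, by norm_num⟩
  have h2le : (2:Int) ≤ nextLargestSize_alt limit := hmax 2 hSP2
  refine ⟨?_, hmax⟩
  rcases foldl_step_cases limit (prodList limit) 0 with h | ⟨hmem, hlt⟩
  · rw [alt_eq_flat] at h2le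
    omega
  · rw [alt_eq_flat]
    obtain ⟨a, b, c, d, heq, _, _, _, _⟩ := (mem_prodList limit h3 _).mp hmem
    exact ⟨hlt, a, b, c, d, heq⟩

theorem AB_eq (limit : Int) (h3 : 3 ≤ limit) :
    nextLargestSize limit = nextLargestSize_alt limit := by
  obtain ⟨hASP, hAmax⟩ := A_max limit h3
  obtain ⟨hBSP, hBmax⟩ := B_max limit h3
  have h1 := hAmax _ hBSP
  have h2 := hBmax _ hASP
  omega

-- ===== VERDICT (by name: the statement is the Claim_ definition above) =====
theorem nextLargestSize_spec : Claim_equal_nextLargestSize := by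
  intro limit _ hpre
  unfold Spec_nextLargestSize
  exact AB_eq limit hpre
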